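-- pv_equiv track=rewrite | github.com/TeraBT/uibk-python | exercise-4/porter.py | step_1b_helper
-- ===== SOURCE A (Python) =====
-- def is_consonant(word, index):
-- 	if word[index] in ['a', 'e', 'i', 'o', 'u']:
-- 		return False
-- 	if word[index] == 'y':
-- 		if index == 0:
-- 			return True
-- 		else:
-- 			return not is_consonant(word, index - 1)
-- 	return True
--
-- def measure(word):
-- 	cvs = ""
-- 	for i in range(len(word)):
-- 		if is_consonant(word, i):
-- 			cvs = cvs + "c"
-- 		else:
-- 			cvs = cvs + "v"
--
-- 	return cvs.count("vc")
--
-- def ends_in_double_consonant(word):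
-- 	if len(word) >= 2 and is_consonant(word, len(word) - 1):
-- 		if word[-1] == word[-2]:
-- 			return True
-- 	return False
--
-- def ends_in_cvc(word):
-- 	if len(word) >= 3:
-- 		if is_consonant(word, len(word) - 3) and not is_consonant(word, len(word) - 2) and is_consonant(word, len(word) - 1) and word[-1] not in ['w', 'x', 'y']:
-- 			return True
-- 	return False
--
-- def replace(word, suffix, replacement):
--   return word[:-len(suffix)] + replacement
--
-- def ends(word, suffix):
--   return word[-len(suffix):] == suffix
--
-- def step_1b_helper(word):
--
--   # notice how we're iterating through a list of lists here
--   for suffix_pair in [ [ "at", "ate" ],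
--                        [ "bl", "ble" ],
--                        [ "iz", "ize" ] ]:
--     suffix = suffix_pair[0]
--     replacement = suffix_pair[1]
--     if ends(word, suffix):
--       return replace(word, suffix, replacement)
--
--   if ends_in_double_consonant(word) and word[len(word) - 1] not in ["l", "s", "z"]:
--     return word[:-1]
--
--   if measure(word) == 1 and ends_in_cvc(word):
--     return word + "e"
--
--   return word
-- ===== SOURCE B (Python) =====
-- def step_1b_helper(word):
--     for suf, rep in (("at", "ate"), ("bl", "ble"), ("iz", "ize")):
--         if word.endswith(suf):
--             return word[:-2] + rep
--     n = len(word)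
--     cons = []
--     for i in range(n):
--         ch = word[i]
--         if ch in "aeiou":
--             c = False
--         elif ch == 'y':
--             c = True if i == 0 else not cons[i - 1]
--         else:
--             c = True
--         cons.append(c)
--     m = 0
--     for i in range(1, n):
--         if cons[i] and not cons[i - 1]:
--             m += 1
--     if n >= 2 and cons[n - 1] and word[n - 1] == word[n - 2] and word[n - 1] not in "lsz":
--         return word[:-1]
--     if m == 1 and n >= 3 and cons[n - 3] and not cons[n - 2] and cons[n - 1] and word[n - 1] not in "wxy":
--         return word + "e"
--     return word
-- ===== Notes on version B (the rewrite author's own statement) =====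
-- stated objective: simpler
-- what changed: B computes the consonant/vowel classification once in a single forward pass into a shared boolean table (resolving each y from the previously computed cell), then reads the measure (counting vowel-to-consonant transitions), the double-consonant test and the cvc test straight off that table, instead of A's per-query recursive is_consonant calls and a rebuilt pattern string scanned for substring occurrences.
import Mathlib
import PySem

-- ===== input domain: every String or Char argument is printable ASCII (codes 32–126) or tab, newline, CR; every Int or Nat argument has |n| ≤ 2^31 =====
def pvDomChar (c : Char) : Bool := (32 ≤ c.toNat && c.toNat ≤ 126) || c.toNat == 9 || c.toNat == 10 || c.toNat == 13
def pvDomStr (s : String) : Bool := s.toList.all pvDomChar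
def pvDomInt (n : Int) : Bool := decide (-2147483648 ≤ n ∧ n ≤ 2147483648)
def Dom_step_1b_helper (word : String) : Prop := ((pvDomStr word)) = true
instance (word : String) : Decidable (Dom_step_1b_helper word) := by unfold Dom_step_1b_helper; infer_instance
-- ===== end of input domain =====

-- ===== PORT A =====
-- B computes the consonant/vowel table once in one forward pass and reads the measure,
-- double-consonant and cvc tests off it; A recomputes is_consonant recursively per query.
-- literal port of is_consonant; every call A makes passes an in-range index, where getD is exact
def isConsA (cs : List Char) (i : Nat) : Bool :=
  let ch := cs.getD i ' '
  if ['a', 'e', 'i', 'o', 'u'].contains ch then false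
  else if ch = 'y' then
    if i = 0 then true else !(isConsA cs (i - 1))
  else true
termination_by i
decreasing_by omega

-- port of measure
def measureA (cs : List Char) : Nat :=
  let cvs := (PySem.List.pyRange 0 (cs.length : Int)).foldl
    (fun acc i => acc ++ [if isConsA cs i.toNat then 'c' else 'v']) []
  PySem.Chars.count cvs ['v', 'c']

-- port of ends_in_double_consonant
def edcA (cs : List Char) : Bool :=
  if 2 ≤ cs.length && isConsA cs (cs.length - 1) then
    PySem.List.pyGet? cs (-1) == PySem.List.pyGet? cs (-2)
  else false

-- port of ends_in_cvc
def ecvcA (cs : List Char) : Bool :=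
  if 3 ≤ cs.length then
    isConsA cs (cs.length - 3) && !(isConsA cs (cs.length - 2)) && isConsA cs (cs.length - 1)
      && !((PySem.List.pyGet? cs (-1)).any (fun c => ['w', 'x', 'y'].contains c))
  else false

-- port of ends
def endsA (cs suf : List Char) : Bool :=
  PySem.List.slice cs (some (-(suf.length : Int))) none == suf

-- port of replace
def replaceA (cs suf rep : List Char) : List Char :=
  PySem.List.slice cs none (some (-(suf.length : Int))) ++ rep

-- the for-loop over suffix pairs with its early return
def step1bLoopA (cs : List Char) : List (List Char × List Char) → Option (List Char)
  | [] => none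
  | (suf, rep) :: rest =>
    if endsA cs suf then some (replaceA cs suf rep) else step1bLoopA cs rest

def step_1b_helper (word : String) : String :=
  let cs := word.toList
  match step1bLoopA cs [(['a', 't'], ['a', 't', 'e']),
                        (['b', 'l'], ['b', 'l', 'e']),
                        (['i', 'z'], ['i', 'z', 'e'])] with
  | some r => String.ofList r
  | none =>
    if edcA cs && !(['l', 's', 'z'].contains (cs.getD (cs.length - 1) ' ')) then
      String.ofList (PySem.List.slice cs none (some (-1)))
    else if measureA cs == 1 && ecvcA cs then
      String.ofList (cs ++ ['e'])
    else word

-- ===== PORT B =====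
-- single forward pass: cons[i] decided from word[i] and the already-computed cons[i-1]
def buildConsB (cs : List Char) : List Bool :=
  (List.range cs.length).foldl (fun acc i =>
    let ch := cs.getD i ' '
    let c : Bool :=
      if ['a', 'e', 'i', 'o', 'u'].contains ch then false
      else if ch = 'y' then (if i = 0 then true else !(acc.getD (i - 1) false))
      else true
    acc ++ [c]) []

def step_1b_helper_alt (word : String) : String :=
  let cs := word.toList
  if PySem.Chars.endswith cs ['a', 't'] then
    String.ofList (PySem.List.slice cs none (some (-2)) ++ ['a', 't', 'e'])
  else if PySem.Chars.endswith cs ['b', 'l'] then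
    String.ofList (PySem.List.slice cs none (some (-2)) ++ ['b', 'l', 'e'])
  else if PySem.Chars.endswith cs ['i', 'z'] then
    String.ofList (PySem.List.slice cs none (some (-2)) ++ ['i', 'z', 'e'])
  else
    let n := cs.length
    let cons := buildConsB cs
    let m : Int := (List.range' 1 (n - 1)).foldl
      (fun m i => if cons.getD i false && !(cons.getD (i - 1) false) then m + 1 else m) 0
    if 2 ≤ n && cons.getD (n - 1) false && cs.getD (n - 1) ' ' == cs.getD (n - 2) ' '
        && !(['l', 's', 'z'].contains (cs.getD (n - 1) ' ')) then
      String.ofList (PySem.List.slice cs none (some (-1)))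
    else if m == 1 && 3 ≤ n && cons.getD (n - 3) false && !(cons.getD (n - 2) false)
        && cons.getD (n - 1) false && !(['w', 'x', 'y'].contains (cs.getD (n - 1) ' ')) then
      String.ofList (cs ++ ['e'])
    else word

-- ===== PRECONDITION & SPEC =====
def Spec_step_1b_helper (word : String) (out : String) : Prop := out = step_1b_helper_alt word
instance (word : String) (out : String) : Decidable (Spec_step_1b_helper word out) := by unfold Spec_step_1b_helper; infer_instance

-- ===== CLAIM (what is proved, stated in full; the proofs are below) =====
def Claim_equal_step_1b_helper : Prop := ∀ (word : String), Dom_step_1b_helper word → Spec_step_1b_helper word (step_1b_helper word)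

-- ===== LEMMAS AND PROOFS =====

-- B's table agrees with A's recursive classifier
lemma buildConsB_eq (cs : List Char) : buildConsB cs = (List.range cs.length).map (isConsA cs) := by
  unfold buildConsB
  induction cs.length with
  | zero => simp
  | succ k ih =>
    rw [List.range_succ, List.foldl_append, List.map_append, ih]
    simp only [List.foldl_cons, List.foldl_nil, List.map_cons, List.map_nil]
    congr 1
    rw [isConsA]
    rcases Nat.eq_zero_or_pos k with rfl | hk
    · simp
    · simp [Nat.pos_iff_ne_zero.mp hk, List.getElem?_range (show k - 1 < k by omega)]

-- adjacent 'v','c' pairs of a character list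
def pairsVC : List Char → Nat
  | x :: y :: t => (if x = 'v' ∧ y = 'c' then 1 else 0) + pairsVC (y :: t)
  | _ => 0

lemma pairsVC_c_cons (t : List Char) : pairsVC ('c' :: t) = pairsVC t := by
  cases t <;> simp [pairsVC]

lemma count_go_vc (fuel : Nat) : ∀ (s : List Char) (acc : Nat), s.length ≤ fuel →
    PySem.Chars.count.go ['v', 'c'] fuel s acc = acc + pairsVC s := by
  induction fuel with
  | zero =>
    intro s acc h
    have : s = [] := by cases s <;> simp_all
    subst this
    simp [PySem.Chars.count.go, pairsVC]
  | succ fuel ih =>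
    intro s acc h
    cases s with
    | nil => simp [PySem.Chars.count.go, pairsVC]
    | cons x t =>
      rw [PySem.Chars.count.go]
      by_cases hp : List.isPrefixOf ['v', 'c'] (x :: t) = true
      · obtain ⟨y, t', rfl⟩ : ∃ y t', t = y :: t' := by
          cases t with
          | nil => simp [List.isPrefixOf] at hp
          | cons y t' => exact ⟨y, t', rfl⟩
        obtain ⟨rfl, rfl⟩ : 'v' = x ∧ 'c' = y := by simpa [List.isPrefixOf] using hp
        simp only [hp, if_true]
        rw [ih _ _ (by simp at h ⊢; omega)]
        simp [pairsVC, pairsVC_c_cons]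
        omega
      · simp only [hp]
        cases t with
        | nil =>
          cases fuel <;> simp [PySem.Chars.count.go, pairsVC]
        | cons y t' =>
          have hih := ih (y :: t') acc (by simp at h ⊢; omega)
          simp only [Bool.false_eq_true, if_false]
          rw [hih]
          have hnot : ¬(x = 'v' ∧ y = 'c') := by
            rintro ⟨rfl, rfl⟩; simp [List.isPrefixOf] at hp
          simp [pairsVC, if_neg hnot]

lemma count_vc (s : List Char) : PySem.Chars.count s ['v', 'c'] = pairsVC s := by
  rw [PySem.Chars.count]
  simp
  simpa using count_go_vc s.length s 0 le_rfl

lemma pairsVC_map_range' (f : Nat → Char) : ∀ (n k : Nat),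
    pairsVC ((List.range' k n).map f) =
      (List.range' (k + 1) (n - 1)).countP (fun i => f (i - 1) = 'v' && f i = 'c') := by
  intro n
  induction n using Nat.strong_induction_on with
  | _ n ih =>
    intro k
    match n with
    | 0 => simp [pairsVC]
    | 1 => simp [List.range', pairsVC]
    | n + 2 =>
      have h1 : List.range' k (n + 2) = k :: (k + 1) :: List.range' (k + 1 + 1) n := by
        simp [List.range'_succ]
      have h2 : (f (k + 1)) :: List.map f (List.range' (k + 1 + 1) n) =
          List.map f (List.range' (k + 1) (n + 1)) := by
        simp [List.range'_succ]
      have h3 : List.range' (k + 1) (n + 2 - 1) = (k + 1) :: List.range' (k + 1 + 1) n := by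
        simp [List.range'_succ]
      rw [h1]
      simp only [List.map_cons, pairsVC]
      rw [h2, ih (n + 1) (by omega) (k + 1), h3, List.countP_cons]
      have h4 : (k + 1 - 1) = k := by omega
      have h5 : (n + 1 - 1) = n := by omega
      rw [h4, h5]
      by_cases hc : f k = 'v' ∧ f (k + 1) = 'c'
      · simp [hc]
        omega
      · simp [hc]

lemma measureA_eq (cs : List Char) :
    measureA cs = (List.range' 1 (cs.length - 1)).countP
      (fun i => !(isConsA cs (i - 1)) && isConsA cs i) := by
  unfold measureA
  rw [PySem.List.foldl_append_singleton_eq_map, PySem.List.pyRange_zero_natCast]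
  simp only [List.nil_append, List.map_map]
  have hmap : ((fun i : Int => if isConsA cs i.toNat then 'c' else 'v') ∘ (fun k : Nat => (k : Int)))
      = (fun i : Nat => if isConsA cs i then 'c' else 'v') := by
    funext a; simp
  rw [hmap, count_vc, List.range_eq_range', pairsVC_map_range' _ cs.length 0]
  apply List.countP_congr
  intro i _
  by_cases h1 : isConsA cs (i - 1) <;> by_cases h2 : isConsA cs i <;> simp [h1, h2]

lemma ends_eq_endswith (cs suf : List Char) (h : 0 < suf.length) :
    endsA cs suf = PySem.Chars.endswith cs suf := by
  unfold endsA PySem.Chars.endswith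
  rw [PySem.List.slice_from_neg_natCast cs suf.length h]
  by_cases hs : suf <:+ cs
  · have hd := List.suffix_iff_eq_drop.mp hs
    rw [← hd]
    simp [List.isSuffixOf_iff_suffix, hs]
  · have h1 : (List.drop (cs.length - suf.length) cs == suf) = false := by
      simp only [beq_eq_false_iff_ne, ne_eq]
      intro heq
      exact hs (List.suffix_iff_eq_drop.mpr heq.symm)
    have h2 : suf.isSuffixOf cs = false :=
      Bool.eq_false_iff.mpr (fun hb => hs (List.isSuffixOf_iff_suffix.mp hb))
    rw [h1, h2]

lemma edcA_iff (cs : List Char) :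
    (edcA cs = true) ↔ 2 ≤ cs.length ∧ isConsA cs (cs.length - 1) = true ∧
      cs[cs.length - 1]?.getD ' ' = cs[cs.length - 2]?.getD ' ' := by
  unfold edcA
  by_cases h : 2 ≤ cs.length
  · by_cases hc : isConsA cs (cs.length - 1)
    · rw [if_pos (by simp [h, hc])]
      rw [PySem.List.pyGet?_neg_one, PySem.List.pyGet?_neg_ofNat cs 2 (by omega) h]
      have l1 : cs.length - 1 < cs.length := by omega
      have l2 : cs.length - 2 < cs.length := by omega
      rw [List.getLast?_eq_getElem?]
      simp [List.getElem?_eq_getElem l1, List.getElem?_eq_getElem l2, h, hc]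
    · rw [if_neg (by simp [hc])]
      simp [hc]
  · rw [if_neg (by simp [h])]
    simp [h]

lemma ecvcA_iff (cs : List Char) :
    (ecvcA cs = true) ↔ 3 ≤ cs.length ∧ isConsA cs (cs.length - 3) = true ∧
      ¬ isConsA cs (cs.length - 2) = true ∧ isConsA cs (cs.length - 1) = true ∧
      ¬(cs[cs.length - 1]?.getD ' ' = 'w' ∨ cs[cs.length - 1]?.getD ' ' = 'x' ∨
        cs[cs.length - 1]?.getD ' ' = 'y') := by
  unfold ecvcA
  by_cases h : 3 ≤ cs.length
  · rw [if_pos h, PySem.List.pyGet?_neg_one, List.getLast?_eq_getElem?]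
    have l1 : cs.length - 1 < cs.length := by omega
    simp [List.getElem?_eq_getElem l1, h]
    tauto
  · rw [if_neg h]
    simp [h]

set_option maxHeartbeats 2000000 in
theorem step_1b_helper_spec_aux (word : String) : step_1b_helper word = step_1b_helper_alt word := by
  unfold step_1b_helper step_1b_helper_alt
  simp only [step1bLoopA, ends_eq_endswith _ _ (by decide : 0 < (['a','t'] : List Char).length),
    ends_eq_endswith _ _ (by decide : 0 < (['b','l'] : List Char).length),
    ends_eq_endswith _ _ (by decide : 0 < (['i','z'] : List Char).length)]
  by_cases h1 : PySem.Chars.endswith word.toList ['a', 't'] <;>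
    by_cases h2 : PySem.Chars.endswith word.toList ['b', 'l'] <;>
      by_cases h3 : PySem.Chars.endswith word.toList ['i', 'z'] <;>
        simp only [h1, h2, h3, if_true, replaceA]
  all_goals try norm_num
  -- the suffix-free branch
  set cs := word.toList with hcs
  have hlen : word.length = cs.length := by simp [hcs]
  rw [hlen] at *
  have hg : ∀ j, j < cs.length → (buildConsB cs)[j]?.getD false = isConsA cs j := by
    intro j hj
    rw [buildConsB_eq]
    simp [List.getElem?_range hj]
  have hm : List.foldl (fun m i =>
        if (buildConsB cs)[i]?.getD false = true ∧ (buildConsB cs)[i - 1]?.getD false = false then m + 1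
        else m) 0 (List.range' 1 (cs.length - 1)) = ((measureA cs : Nat) : Int) := by
    rw [PySem.List.foldl_ite_add_one, measureA_eq]
    simp only [zero_add]
    congr 1
    apply List.countP_congr
    intro i hi
    rw [List.mem_range'] at hi
    obtain ⟨j, hj, rfl⟩ := hi
    have hi1 : 1 ≤ 1 + 1 * j := by omega
    have hi2 : 1 + 1 * j < cs.length := by omega
    rw [hg _ hi2, hg (1 + 1 * j - 1) (by omega)]
    simp [and_comm]
  rw [hm]
  have hC1 : (edcA cs = true ∧
      (¬cs[cs.length - 1]?.getD ' ' = 'l' ∧ ¬cs[cs.length - 1]?.getD ' ' = 's' ∧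
        ¬cs[cs.length - 1]?.getD ' ' = 'z')) ↔
      (((2 ≤ cs.length ∧ (buildConsB cs)[cs.length - 1]?.getD false = true) ∧
          cs[cs.length - 1]?.getD ' ' = cs[cs.length - 2]?.getD ' ') ∧
        (¬cs[cs.length - 1]?.getD ' ' = 'l' ∧ ¬cs[cs.length - 1]?.getD ' ' = 's' ∧
          ¬cs[cs.length - 1]?.getD ' ' = 'z')) := by
    rw [edcA_iff]
    constructor
    · rintro ⟨⟨hn, hc, he⟩, hl⟩
      exact ⟨⟨⟨hn, by rw [hg (cs.length - 1) (by omega)]; exact hc⟩, he⟩, hl⟩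
    · rintro ⟨⟨⟨hn, hc⟩, he⟩, hl⟩
      rw [hg (cs.length - 1) (by omega)] at hc
      exact ⟨⟨hn, hc, he⟩, hl⟩
  have hC2 : (measureA cs = 1 ∧ ecvcA cs = true) ↔
      (((((((measureA cs : Nat) : Int) = 1 ∧ 3 ≤ cs.length) ∧
            (buildConsB cs)[cs.length - 3]?.getD false = true) ∧
          (buildConsB cs)[cs.length - 2]?.getD false = false) ∧
        (buildConsB cs)[cs.length - 1]?.getD false = true) ∧
        (¬cs[cs.length - 1]?.getD ' ' = 'w' ∧ ¬cs[cs.length - 1]?.getD ' ' = 'x' ∧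
          ¬cs[cs.length - 1]?.getD ' ' = 'y')) := by
    rw [ecvcA_iff]
    constructor
    · rintro ⟨hme, hn3, hc3, hc2, hc1, hw⟩
      refine ⟨⟨⟨⟨⟨by rw [hme]; rfl, hn3⟩, by rw [hg (cs.length - 3) (by omega)]; exact hc3⟩, ?_⟩,
        by rw [hg (cs.length - 1) (by omega)]; exact hc1⟩, by tauto⟩
      rw [hg (cs.length - 2) (by omega)]
      simpa using hc2
    · rintro ⟨⟨⟨⟨⟨hme, hn3⟩, hc3⟩, hc2⟩, hc1⟩, hw⟩
      rw [hg (cs.length - 3) (by omega)] at hc3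
      rw [hg (cs.length - 1) (by omega)] at hc1
      rw [hg (cs.length - 2) (by omega)] at hc2
      refine ⟨Nat.cast_inj.mp (by rw [hme]; rfl), hn3, hc3, by simp [hc2], hc1, by tauto⟩
  rw [if_congr hC1 rfl (if_congr hC2 rfl rfl)]

-- ===== VERDICT (by name: the statement is the Claim_ definition above) =====
theorem step_1b_helper_spec : Claim_equal_step_1b_helper := by
  intro word _
  exact step_1b_helper_spec_aux word
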